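-- pv_equiv track=rewrite | github.com/keniferAma/retos-de-programacion | count_subarrays_where_max.py | subarray_counter
-- ===== SOURCE A (Python) =====
-- from collections import Counter
-- from collections import Counter
--
-- def subarray_counter(nums, k):
--     # Initialize the result
--     result = 0
--
--     # Iterate over the array
--     for i in range(len(nums)):
--         # Initialize a counter for the current subarray
--         counter = Counter()
--
--         # Iterate over the rest of the array
--         for j in range(i, len(nums)):
--             # Update the counter for the current element
--             counter[nums[j]] += 1
--
--             # If the count of the current element is at least k, increment the result
--             if counter[nums[j]] >= k:
--                 result += 1
--
--     # Return the result
--     return result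
-- ===== SOURCE B (Python) =====
-- def subarray_counter(nums, k):
--     # One pass: for each j, the valid starts i are exactly 0..p, where p is the
--     # k-th-from-last occurrence of nums[j] so far (clamped to the last, i.e. j,
--     # when k <= 0, since then every start works).
--     result = 0
--     pos = {}
--     for j, v in enumerate(nums):
--         lst = pos.setdefault(v, [])
--         lst.append(j)
--         m = len(lst)
--         if k <= m:
--             result += lst[min(m - k, m - 1)] + 1
--     return result
-- ===== Notes on version B (the rewrite author's own statement) =====
-- stated objective: faster
-- what changed: Replaced the quadratic all-starts scan with a single pass that keeps, per value, its list of occurrence positions and adds for each end index j the count of valid starts in closed form (position of the k-th-from-last occurrence of nums[j] plus one).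
import Mathlib
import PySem

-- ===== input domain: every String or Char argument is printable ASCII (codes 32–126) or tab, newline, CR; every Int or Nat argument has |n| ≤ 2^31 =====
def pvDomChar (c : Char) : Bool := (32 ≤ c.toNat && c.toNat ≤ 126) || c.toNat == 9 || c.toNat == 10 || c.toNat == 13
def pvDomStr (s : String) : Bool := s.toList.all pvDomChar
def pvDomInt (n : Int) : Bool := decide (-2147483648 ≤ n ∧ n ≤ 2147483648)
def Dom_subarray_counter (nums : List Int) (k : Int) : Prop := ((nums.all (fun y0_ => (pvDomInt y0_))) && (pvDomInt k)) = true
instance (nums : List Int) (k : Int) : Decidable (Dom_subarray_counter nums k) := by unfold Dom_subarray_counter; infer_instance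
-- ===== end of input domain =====

-- B replaces A's quadratic scan over all start indices by one pass over end indices
-- using per-value occurrence-position lists (measured faster; equality proved below).

-- ===== PORT A =====
-- inner-loop body of A: counter[nums[j]] += 1; if counter[nums[j]] >= k: result += 1
def aStep (k : Int) (nums : List Int) (s : Int × PySem.Dict Int Int) (j : Int) : Int × PySem.Dict Int Int :=
  let v := PySem.List.pyGetD nums j 0
  let c := s.2.modify v 0 (· + 1)
  if k ≤ c.getD v 0 then (s.1 + 1, c) else (s.1, c)

def subarray_counter (nums : List Int) (k : Int) : Int :=
  (PySem.List.pyRange 0 (nums.length : Int) 1).foldl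
    (fun result i =>
      ((PySem.List.pyRange i (nums.length : Int) 1).foldl (aStep k nums)
        (result, PySem.Dict.empty)).1)
    0

-- ===== PORT B =====
-- loop body of B: lst = pos.setdefault(v, []); lst.append(j); if k <= len(lst): result += lst[min(len-k, len-1)] + 1
def bStep (k : Int) (s : Int × PySem.Dict Int (List Int)) (p : Int × Int) : Int × PySem.Dict Int (List Int) :=
  let lst := s.2.getD p.2 [] ++ [p.1]
  let d := s.2.insert p.2 lst
  if k ≤ (lst.length : Int) then
    (s.1 + PySem.List.pyGetD lst (min ((lst.length : Int) - k) ((lst.length : Int) - 1)) 0 + 1, d)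
  else (s.1, d)

def subarray_counter_alt (nums : List Int) (k : Int) : Int :=
  ((PySem.List.enumerate nums 0).foldl (bStep k) (0, PySem.Dict.empty)).1

-- ===== PRECONDITION & SPEC =====
def Spec_subarray_counter (nums : List Int) (k : Int) (out : Int) : Prop := out = subarray_counter_alt nums k
instance (nums : List Int) (k : Int) (out : Int) : Decidable (Spec_subarray_counter nums k out) := by unfold Spec_subarray_counter; infer_instance

-- ===== CLAIM (what is proved, stated in full; the proofs are below) =====
def Claim_equal_subarray_counter : Prop := ∀ (nums : List Int) (k : Int), Dom_subarray_counter nums k → Spec_subarray_counter nums k (subarray_counter nums k)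

-- ===== LEMMAS AND PROOFS =====

-- positions (0-based, as Ints) of v in l
def posits (v : Int) : List Int → List Int
  | [] => []
  | a :: rest => (if a = v then [(0 : Int)] else []) ++ (posits v rest).map (· + 1)

-- contribution of one end index: value B adds for the occurrence-position list lst
def contrib (k : Int) (lst : List Int) : Int :=
  if k ≤ (lst.length : Int) then
    PySem.List.pyGetD lst (min ((lst.length : Int) - k) ((lst.length : Int) - 1)) 0 + 1
  else 0

-- what A's inner loop (starting with counter = Counter(pre)) adds over l
def aSum (k : Int) : List Int → List Int → Int
  | _, [] => 0
  | pre, v :: rest => (if k ≤ (pre.count v : Int) + 1 then 1 else 0) + aSum k (pre ++ [v]) rest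

-- what B's loop adds over l after having processed pre
def bSum (k : Int) : List Int → List Int → Int
  | _, [] => 0
  | pre, v :: rest => contrib k (posits v pre ++ [(pre.length : Int)]) + bSum k (pre ++ [v]) rest

theorem length_posits (v : Int) (l : List Int) : (posits v l).length = l.count v := by
  induction l with
  | nil => simp [posits]
  | cons a rest ih =>
    by_cases h : a = v <;> simp [posits, h, ih]

theorem posits_snoc (v w : Int) (pre : List Int) :
    posits v (pre ++ [w]) = posits v pre ++ (if w = v then [(pre.length : Int)] else []) := by
  induction pre with
  | nil => by_cases h : w = v <;> simp [posits, h]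
  | cons a pre ih =>
    by_cases h : w = v
    · subst h
      simp only [List.cons_append, posits, ih, List.map_append]
      simp
    · simp [posits, ih, h]

theorem foldA (k : Int) : ∀ (l pre : List Int) (acc : Int),
    (l.foldl (fun s v =>
        let c := PySem.Dict.modify s.2 v 0 (· + 1)
        if k ≤ c.getD v 0 then (s.1 + 1, c) else (s.1, c))
      (acc, PySem.Dict.counter pre)).1 = acc + aSum k pre l := by
  intro l
  induction l with
  | nil => intro pre acc; simp [aSum]
  | cons v rest ih =>
    intro pre acc
    have hc : PySem.Dict.modify (PySem.Dict.counter pre) v 0 (· + 1)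
        = PySem.Dict.counter (pre ++ [v]) := by
      simp [PySem.Dict.counter_append_singleton]
    simp only [List.foldl_cons, aSum, hc, PySem.Dict.getD_counter, List.count_append,
      List.count_singleton_self]
    by_cases h : k ≤ (pre.count v : Int) + 1
    · rw [if_pos (by push_cast; omega), if_pos h, ih]
      ring
    · rw [if_neg (by push_cast; omega), if_neg h, ih]
      ring

theorem foldB (k : Int) : ∀ (l pre : List Int) (acc : Int) (d : PySem.Dict Int (List Int)),
    (∀ w, d.getD w [] = posits w pre) →
    ((PySem.List.enumerate l (pre.length : Int)).foldl (bStep k) (acc, d)).1 = acc + bSum k pre l := by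
  intro l
  induction l with
  | nil => intro pre acc d hd; simp [bSum]
  | cons v rest ih =>
    intro pre acc d hd
    rw [PySem.List.enumerate_cons, List.foldl_cons]
    have hinv : ∀ w, (d.insert v (posits v pre ++ [(pre.length : Int)])).getD w []
        = posits w (pre ++ [v]) := by
      intro w
      rw [PySem.Dict.getD_insert, posits_snoc]
      by_cases hw : w = v
      · simp [hw]
      · simp [hw, Ne.symm hw, hd]
    have hstep : bStep k (acc, d) ((pre.length : Int), v)
        = (acc + contrib k (posits v pre ++ [(pre.length : Int)]),
           d.insert v (posits v pre ++ [(pre.length : Int)])) := by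
      simp only [bStep, hd, contrib]
      by_cases h : k ≤ ((posits v pre ++ [(pre.length : Int)]).length : Int)
      · rw [if_pos h, if_pos h]
        simp [add_assoc]
      · rw [if_neg h, if_neg h]
        simp
    rw [hstep]
    have hlen : (pre.length : Int) + 1 = (((pre ++ [v]).length) : Int) := by simp
    rw [hlen, ih (pre ++ [v]) _ _ hinv]
    simp only [bSum]
    ring

theorem aSum_snoc (k : Int) : ∀ (l pre : List Int) (v : Int),
    aSum k pre (l ++ [v]) = aSum k pre l + (if k ≤ ((pre ++ l).count v : Int) + 1 then 1 else 0) := by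
  intro l
  induction l with
  | nil => intro pre v; simp [aSum]
  | cons u t ih =>
    intro pre v
    simp only [List.cons_append, aSum, ih, List.append_assoc, List.nil_append]
    ring

theorem bSum_snoc (k : Int) : ∀ (l pre : List Int) (v : Int),
    bSum k pre (l ++ [v]) = bSum k pre l + contrib k (posits v (pre ++ l) ++ [((pre ++ l).length : Int)]) := by
  intro l
  induction l with
  | nil => intro pre v; simp [bSum]
  | cons u t ih =>
    intro pre v
    simp only [List.cons_append, bSum, ih, List.append_assoc, List.nil_append]
    ring

theorem pyGetD_pos_cons (a : Int) (xs : List Int) (i : Int) (h1 : 1 ≤ i)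
    (h2 : i < (xs.length : Int) + 1) (d : Int) :
    PySem.List.pyGetD (a :: xs) i d = PySem.List.pyGetD xs (i - 1) d := by
  rw [PySem.List.pyGetD_eq_getElem (a :: xs) d (by omega) (by simp; omega),
    PySem.List.pyGetD_eq_getElem xs d (by omega) (by simp; omega)]
  have hn : i.toNat = (i - 1).toNat + 1 := by omega
  simp only [hn, List.getElem_cons_succ]

theorem pyGetD_map_add_one (xs : List Int) (i : Int) (h1 : 0 ≤ i)
    (h2 : i < (xs.length : Int)) (d : Int) :
    PySem.List.pyGetD (xs.map (· + 1)) i d = PySem.List.pyGetD xs i 0 + 1 := by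
  rw [PySem.List.pyGetD_eq_getElem (xs.map (· + 1)) d (by omega) (by simp; omega),
    PySem.List.pyGetD_eq_getElem xs 0 (by omega) h2]
  simp

theorem contrib_cons_zero_mapadd (k : Int) (l : List Int) (h : l ≠ []) :
    contrib k ((0 : Int) :: l.map (· + 1)) = (if k ≤ (l.length : Int) + 1 then 1 else 0) + contrib k l := by
  have hm : 0 < l.length := by cases l with | nil => exact absurd rfl h | cons a t => simp
  have hm' : (1 : Int) ≤ (l.length : Int) := by exact_mod_cast hm
  unfold contrib
  simp only [List.length_cons, List.length_map]
  by_cases h1 : k ≤ (l.length : Int)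
  · -- head ite is 1, both contribs have true guards
    rw [if_pos (by push_cast; omega), if_pos (by omega), if_pos h1]
    have hidx : min ((((l.length + 1 : Nat)) : Int) - k) ((((l.length + 1 : Nat)) : Int) - 1)
        = min ((l.length : Int) - k) ((l.length : Int) - 1) + 1 := by omega
    rw [hidx, pyGetD_pos_cons _ _ _ (by omega) (by simp), add_sub_cancel_right,
      pyGetD_map_add_one _ _ (by omega) (by omega)]
    ring
  · by_cases h2 : k ≤ (l.length : Int) + 1
    · -- k = len + 1 : index 0, head element 0
      rw [if_pos (by push_cast; omega), if_pos h2, if_neg h1]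
      have hidx : min ((((l.length + 1 : Nat)) : Int) - k) ((((l.length + 1 : Nat)) : Int) - 1)
          = 0 := by push_cast; omega
      rw [hidx, PySem.List.pyGetD_zero_cons]
      ring
    · rw [if_neg (by push_cast; omega), if_neg h2, if_neg h1]
      ring

theorem contrib_mapadd (k : Int) (l : List Int) (h : l ≠ []) :
    contrib k (l.map (· + 1)) = (if k ≤ (l.length : Int) then 1 else 0) + contrib k l := by
  have hm : 0 < l.length := by cases l with | nil => exact absurd rfl h | cons a t => simp
  have hm' : (1 : Int) ≤ (l.length : Int) := by exact_mod_cast hm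
  unfold contrib
  simp only [List.length_map]
  by_cases h1 : k ≤ (l.length : Int)
  · rw [if_pos h1, if_pos h1, if_pos h1,
      pyGetD_map_add_one _ _ (by omega) (by omega)]
    ring
  · rw [if_neg h1, if_neg h1, if_neg h1]
    ring

-- core: the number of valid starts for end index n with value v, in closed form
theorem core (k v : Int) : ∀ (nums : List Int),
    ((List.range (nums.length + 1)).map
      (fun i => if k ≤ ((nums.drop i).count v : Int) + 1 then (1 : Int) else 0)).sum
    = contrib k (posits v nums ++ [(nums.length : Int)]) := by
  intro nums
  induction nums with
  | nil =>
    have h0 : contrib k [(0 : Int)] = if k ≤ (1 : Int) then 1 else 0 := by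
      by_cases h : k ≤ (1 : Int)
      · have hidx : min ((1 : Int) - k) (1 - 1) = 0 := by omega
        simp [contrib, h, PySem.List.pyGetD_zero_cons]
      · simp [contrib, h]
    simp [posits, h0]
  | cons a rest ih =>
    have hrange : List.range ((a :: rest).length + 1)
        = 0 :: (List.range (rest.length + 1)).map Nat.succ := by
      simp [List.length_cons, List.range_succ_eq_map]
    rw [hrange, List.map_cons, List.sum_cons, List.map_map]
    have hswap : ((List.range (rest.length + 1)).map
        ((fun i => if k ≤ (((a :: rest).drop i).count v : Int) + 1 then (1 : Int) else 0) ∘ Nat.succ)).sum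
        = contrib k (posits v rest ++ [(rest.length : Int)]) := by
      rw [← ih]
      apply congrArg List.sum
      apply List.map_congr_left
      intro i _
      simp [Function.comp, List.drop_succ_cons]
    rw [hswap]
    have hne : posits v rest ++ [(rest.length : Int)] ≠ [] := by simp
    have hplen : ((posits v rest ++ [(rest.length : Int)]).length : Int)
        = (rest.count v : Int) + 1 := by
      simp [length_posits]
    by_cases hav : a = v
    · subst hav
      have hlist : posits a (a :: rest) ++ [((a :: rest).length : Int)]
          = (0 : Int) :: (posits a rest ++ [(rest.length : Int)]).map (· + 1) := by
        simp [posits, List.map_append]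
        try push_cast
        try ring
      rw [hlist, contrib_cons_zero_mapadd _ _ hne]
      have e1 : ((((a :: rest).drop 0).count a : Int)) + 1 = (rest.count a : Int) + 2 := by
        simp [List.count_cons_self]
        try push_cast
        try ring
      rw [List.drop_zero] at e1 ⊢
      rw [e1, hplen]
      try ring_nf
    · have hlist : posits v (a :: rest) ++ [((a :: rest).length : Int)]
          = (posits v rest ++ [(rest.length : Int)]).map (· + 1) := by
        simp [posits, hav, List.map_append]
        try push_cast
        try ring
      rw [hlist, contrib_mapadd _ _ hne]
      have e1 : ((((a :: rest).drop 0).count v : Int)) + 1 = (rest.count v : Int) + 1 := by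
        simp [List.count_cons_of_ne hav]
      rw [List.drop_zero] at e1 ⊢
      rw [e1, hplen]
      try ring_nf

theorem grand (k : Int) : ∀ (nums : List Int),
    ((List.range (nums.length + 1)).map (fun i => aSum k [] (nums.drop i))).sum = bSum k [] nums := by
  intro nums
  induction nums using List.reverseRecOn with
  | nil => simp [aSum, bSum]
  | append_singleton nums v ih =>
    have hlen : (nums ++ [v]).length = nums.length + 1 := by simp
    rw [hlen, List.range_succ, List.map_append, List.sum_append]
    have hlast : aSum k [] ((nums ++ [v]).drop (nums.length + 1)) = 0 := by
      have hdrop : (nums ++ [v]).drop (nums.length + 1) = [] := by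
        apply List.drop_eq_nil_of_le
        simp
      rw [hdrop]
      rfl
    have hmain : (List.range (nums.length + 1)).map (fun i => aSum k [] ((nums ++ [v]).drop i))
        = (List.range (nums.length + 1)).map (fun i =>
            aSum k [] (nums.drop i) + (if k ≤ ((nums.drop i).count v : Int) + 1 then (1 : Int) else 0)) := by
      apply List.map_congr_left
      intro i hi
      have hi' : i ≤ nums.length := by
        simp only [List.mem_range] at hi
        omega
      rw [List.drop_append_of_le_length hi', aSum_snoc]
      simp
    rw [hmain, PySem.List.sum_map_add_int, ih, core k v nums, bSum_snoc]
    simp [aSum]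

-- ===== VERDICT (by name: the statement is the Claim_ definition above) =====
theorem subarray_counter_spec : Claim_equal_subarray_counter := by
  intro nums k _hd
  unfold Spec_subarray_counter
  have hB : subarray_counter_alt nums k = bSum k [] nums := by
    unfold subarray_counter_alt
    have hinv : ∀ w, (PySem.Dict.empty : PySem.Dict Int (List Int)).getD w [] = posits w ([] : List Int) := by
      intro w
      simp [PySem.Dict.getD_empty, posits]
    have := foldB k nums [] 0 PySem.Dict.empty hinv
    simpa using this
  have hA : subarray_counter nums k
      = ((List.range (nums.length + 1)).map (fun i => aSum k [] (nums.drop i))).sum := by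
    unfold subarray_counter
    have hbody : ∀ (r : Int) (i : Int), i ∈ PySem.List.pyRange 0 (nums.length : Int) 1 →
        ((PySem.List.pyRange i (nums.length : Int) 1).foldl (aStep k nums) (r, PySem.Dict.empty)).1
        = r + aSum k [] (nums.drop i.toNat) := by
      intro r i hi
      have h0i : (0 : Int) ≤ i := (PySem.List.mem_pyRange_one.mp hi).1
      have hstep : aStep k nums = fun (s : Int × PySem.Dict Int Int) j =>
          (fun (s : Int × PySem.Dict Int Int) (u : Int) =>
            let c := PySem.Dict.modify s.2 u 0 (· + 1)
            if k ≤ c.getD u 0 then (s.1 + 1, c) else (s.1, c)) s (PySem.List.pyGetD nums j 0) := rfl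
      rw [hstep, PySem.List.foldl_pyRange_pyGetD' nums 0
        (fun (s : Int × PySem.Dict Int Int) (u : Int) =>
            let c := PySem.Dict.modify s.2 u 0 (· + 1)
            if k ≤ c.getD u 0 then (s.1 + 1, c) else (s.1, c)) (r, PySem.Dict.empty) h0i]
      have hce : (PySem.Dict.empty : PySem.Dict Int Int) = PySem.Dict.counter ([] : List Int) := rfl
      rw [hce, foldA]
    rw [PySem.List.foldl_congr_mem _ _ _ _ hbody,
      PySem.List.foldl_add (PySem.List.pyRange 0 (nums.length : Int) 1)
        (fun i : Int => aSum k [] (nums.drop i.toNat)) 0]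
    rw [PySem.List.pyRange_zero_nat, List.map_map]
    have hfun : ((fun i => aSum k [] (nums.drop i.toNat)) ∘ (fun n : Nat => (n : Int)))
        = fun n : Nat => aSum k [] (nums.drop n) := by
      funext n
      simp
    rw [hfun, List.range_succ, List.map_append, List.sum_append]
    simp [List.drop_length, aSum]
  rw [hA, hB]
  exact grand k nums
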